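-- pv_equiv track=rewrite | github.com/270aldo/agent.SDK | src/services/pattern_recognition_engine.py | _prioritize_recommendations
-- ===== SOURCE A (Python) =====
-- from typing import Dict, List, Optional, Tuple, Any, Set
--
-- def _prioritize_recommendations(
--
--     recommendations: List[str],
--     features: Dict[str, Any]
-- ) -> List[str]:
--     """Prioritize recommendations based on current context"""
--
--     # Simple prioritization - would be more sophisticated in practice
--     priority_keywords = {
--         'conversion': 10,
--         'objection': 9,
--         'value': 8,
--         'engagement': 7,
--         'roi': 6
--     }
--
--     scored_recs = []
--     for rec in recommendations:
--         score = 0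
--         for keyword, weight in priority_keywords.items():
--             if keyword in rec.lower():
--                 score += weight
--         scored_recs.append((rec, score))
--
--     # Sort by score and return
--     scored_recs.sort(key=lambda x: x[1], reverse=True)
--     return [rec for rec, score in scored_recs]
-- ===== SOURCE B (Python) =====
-- def _prioritize_recommendations(
--     recommendations,
--     features
-- ):
--     """Prioritize recommendations based on current context"""
--
--     priority_keywords = {
--         'conversion': 10,
--         'objection': 9,
--         'value': 8,
--         'engagement': 7,
--         'roi': 6
--     }
--
--     def score(rec):
--         total = 0
--         for keyword, weight in priority_keywords.items():
--             if keyword in rec.lower():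
--                 total += weight
--         return total
--
--     # Bucket (counting) sort: scores lie in 0..40, so group recs by score
--     # in input order and emit buckets from highest score to lowest.
--     buckets = {}
--     for rec in recommendations:
--         buckets.setdefault(score(rec), []).append(rec)
--
--     result = []
--     for s in range(40, -1, -1):
--         result.extend(buckets.get(s, []))
--     return result
-- ===== Notes on version B (the rewrite author's own statement) =====
-- stated objective: alternative
-- what changed: Replaces the comparison sort (sort with key, reverse=True) by a counting/bucket sort: recs are grouped by their score (range 0..40) in input order and the buckets are emitted in descending score order, preserving stable tie order.
import Mathlib
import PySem

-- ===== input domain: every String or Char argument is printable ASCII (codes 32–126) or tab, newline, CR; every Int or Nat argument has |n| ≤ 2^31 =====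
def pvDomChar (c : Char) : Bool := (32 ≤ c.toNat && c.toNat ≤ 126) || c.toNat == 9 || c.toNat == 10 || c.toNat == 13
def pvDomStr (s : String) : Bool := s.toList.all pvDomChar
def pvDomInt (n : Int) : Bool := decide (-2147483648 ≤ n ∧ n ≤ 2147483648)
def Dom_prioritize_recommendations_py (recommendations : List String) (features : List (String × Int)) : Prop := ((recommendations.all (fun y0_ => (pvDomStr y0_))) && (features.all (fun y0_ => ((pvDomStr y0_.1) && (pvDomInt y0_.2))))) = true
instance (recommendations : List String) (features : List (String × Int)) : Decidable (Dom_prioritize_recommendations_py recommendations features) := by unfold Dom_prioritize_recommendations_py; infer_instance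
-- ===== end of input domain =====

-- B replaces A's comparison sort (sorted by score, reverse=True) by a stable bucket/counting
-- sort over the discrete score range 0..40; same scoring, same output order (objective: alternative).


-- the priority_keywords dict literal, shared by both ports
def pvKeywords : List (String × Int) :=
  [("conversion", 10), ("objection", 9), ("value", 8), ("engagement", 7), ("roi", 6)]

-- the scoring loop 'for keyword, weight in priority_keywords.items(): if keyword in rec.lower(): score += weight'
-- (identical in A and B, so both ports share this helper)
def pvScore (rec : String) : Int :=
  pvKeywords.foldl (fun score kw => if PySem.Str.isIn kw.1 (PySem.Str.lower rec) then score + kw.2 else score) 0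

-- ===== PORT A =====
def prioritize_recommendations_py (recommendations : List String) (features : List (String × Int)) : List String :=
  let scored_recs := recommendations.foldl (fun acc rec => acc ++ [(rec, pvScore rec)]) []
  let sorted := PySem.List.sorted scored_recs (fun x => x.2) true
  sorted.map (fun p => p.1)

-- ===== PORT B =====
def prioritize_recommendations_py_alt (recommendations : List String) (features : List (String × Int)) : List String :=
  let buckets : PySem.Dict Int (List String) :=
    recommendations.foldl (fun d rec => d.modify (pvScore rec) [] (fun l => l ++ [rec])) PySem.Dict.empty
  (PySem.List.pyRange 40 (-1) (-1)).foldl (fun result s => result ++ buckets.getD s []) []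

-- ===== PRECONDITION & SPEC =====
def Spec_prioritize_recommendations_py (recommendations : List String) (features : List (String × Int)) (out : List String) : Prop := out = prioritize_recommendations_py_alt recommendations features
instance (recommendations : List String) (features : List (String × Int)) (out : List String) : Decidable (Spec_prioritize_recommendations_py recommendations features out) := by unfold Spec_prioritize_recommendations_py; infer_instance

-- ===== CLAIM (what is proved, stated in full; the proofs are below) =====
def Claim_equal_prioritize_recommendations_py : Prop := ∀ (recommendations : List String) (features : List (String × Int)), Dom_prioritize_recommendations_py recommendations features → Spec_prioritize_recommendations_py recommendations features (prioritize_recommendations_py recommendations features)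

-- ===== LEMMAS AND PROOFS =====

-- descending-order bucket concatenation: for each score s in S, the elements of xs with key s, in order
def pvBucketCat (S : List Int) (xs : List (String × Int)) : List (String × Int) :=
  S.flatMap (fun s => xs.filter (fun p => p.2 == s))

lemma pv_insertBy_cons (before : (String × Int) → (String × Int) → Bool) (x a : String × Int)
    (l : List (String × Int)) :
    PySem.List.insertBy before x (a :: l)
      = if before x a then x :: a :: l else a :: PySem.List.insertBy before x l := rfl

lemma pv_insertBy_append_left (before : (String × Int) → (String × Int) → Bool) (x : String × Int)
    (A R : List (String × Int)) (hA : ∀ a ∈ A, before x a = false) :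
    PySem.List.insertBy before x (A ++ R) = A ++ PySem.List.insertBy before x R := by
  induction A with
  | nil => simp
  | cons a A ih =>
    rw [List.cons_append, pv_insertBy_cons, hA a (by simp), List.cons_append]
    simp only [Bool.false_eq_true, if_false, List.cons.injEq, true_and]
    exact ih (fun a ha => hA a (by simp [ha]))

lemma pv_insertBy_all_before (before : (String × Int) → (String × Int) → Bool) (x : String × Int)
    (R : List (String × Int)) (hR : ∀ r ∈ R, before x r = true) :
    PySem.List.insertBy before x R = x :: R := by
  cases R with
  | nil => rfl
  | cons r R => rw [pv_insertBy_cons, hR r (by simp)]; rfl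

lemma pv_bucketCat_append_of_not_mem (S : List Int) (xs : List (String × Int)) (x : String × Int)
    (h : x.2 ∉ S) : pvBucketCat S (xs ++ [x]) = pvBucketCat S xs := by
  induction S with
  | nil => simp [pvBucketCat]
  | cons s S ih =>
    have hx : (x.2 == s) = false := by
      simp only [beq_eq_false_iff_ne, ne_eq]
      intro hc; exact h (by simp [hc])
    simp only [pvBucketCat, List.flatMap_cons, List.filter_append] at *
    rw [ih (fun hm => h (by simp [hm]))]
    simp [List.filter, hx]

lemma pv_mem_bucketCat_key (S : List Int) (xs : List (String × Int)) (r : String × Int)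
    (h : r ∈ pvBucketCat S xs) : r.2 ∈ S := by
  simp only [pvBucketCat, List.mem_flatMap, List.mem_filter, beq_iff_eq] at h
  obtain ⟨s, hs, _, hk⟩ := h
  exact hk ▸ hs

lemma pv_insertBy_bucketCat (S : List Int) (hS : S.Pairwise (· > ·)) (x : String × Int)
    (hx : x.2 ∈ S) (xs : List (String × Int)) :
    PySem.List.insertBy (fun a b => decide (b.2 < a.2)) x (pvBucketCat S xs)
      = pvBucketCat S (xs ++ [x]) := by
  induction S with
  | nil => simp at hx
  | cons s S ih =>
    have hhead : ∀ t ∈ S, s > t := (List.pairwise_cons.mp hS).1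
    have hS' : S.Pairwise (· > ·) := (List.pairwise_cons.mp hS).2
    have e1 : pvBucketCat (s :: S) xs
        = xs.filter (fun p => p.2 == s) ++ pvBucketCat S xs := by simp [pvBucketCat]
    have e2 : pvBucketCat (s :: S) (xs ++ [x])
        = (xs ++ [x]).filter (fun p => p.2 == s) ++ pvBucketCat S (xs ++ [x]) := by
      simp [pvBucketCat]
    by_cases h : x.2 = s
    · -- x goes at the end of the bucket for s
      have hsnot : s ∉ S := fun hm => absurd (hhead s hm) (lt_irrefl s)
      rw [e1, pv_insertBy_append_left _ _ _ _ (by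
            intro a ha
            have ha2 : a.2 = s := by simpa using (List.mem_filter.mp ha).2
            simp only [decide_eq_false_iff_not]
            omega),
          pv_insertBy_all_before _ _ _ (by
            intro r hr
            have hrS : r.2 ∈ S := pv_mem_bucketCat_key S xs r hr
            have := hhead _ hrS
            simp only [decide_eq_true_eq]
            omega),
          e2, pv_bucketCat_append_of_not_mem S xs x (h ▸ hsnot)]
      have hx2 : (x.2 == s) = true := by simp [h]
      simp [List.filter_append, List.filter, hx2]
    · -- x belongs to a later (smaller-score) bucket
      have hx' : x.2 ∈ S := by
        cases hx with
        | head => exact absurd rfl h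
        | tail _ hm => exact hm
      have hlt : x.2 < s := hhead _ hx'
      rw [e1, pv_insertBy_append_left _ _ _ _ (by
            intro a ha
            have ha2 : a.2 = s := by simpa using (List.mem_filter.mp ha).2
            simp only [decide_eq_false_iff_not]
            omega),
          ih hS' hx', e2]
      have hx2 : (x.2 == s) = false := by simp [h]
      simp [List.filter_append, List.filter, hx2]

lemma pv_sorted_rev_eq_bucketCat (S : List Int) (hS : S.Pairwise (· > ·))
    (xs : List (String × Int)) (hxs : ∀ p ∈ xs, p.2 ∈ S) :
    PySem.List.sorted xs (fun p => p.2) true = pvBucketCat S xs := by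
  rw [PySem.List.sorted_rev_eq_foldl_insertBy]
  induction xs using List.reverseRecOn with
  | nil => simp [pvBucketCat]
  | append_singleton ys x ih =>
    rw [List.foldl_append]
    simp only [List.foldl_cons, List.foldl_nil]
    rw [ih (fun p hp => hxs p (by simp [hp]))]
    exact pv_insertBy_bucketCat S hS x (hxs x (by simp)) ys

-- the score range and its facts
lemma pv_S40_lit : PySem.List.pyRange 40 (-1) (-1)
    = [40, 39, 38, 37, 36, 35, 34, 33, 32, 31, 30, 29, 28, 27, 26, 25, 24, 23, 22, 21,
       20, 19, 18, 17, 16, 15, 14, 13, 12, 11, 10, 9, 8, 7, 6, 5, 4, 3, 2, 1, 0] := by decide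

lemma pv_S40_pairwise : (PySem.List.pyRange 40 (-1) (-1)).Pairwise (· > ·) := by
  rw [pv_S40_lit]; decide

lemma pv_score_bounds (rec : String) : 0 ≤ pvScore rec ∧ pvScore rec ≤ 40 := by
  simp only [pvScore, pvKeywords, List.foldl_cons, List.foldl_nil]
  split_ifs <;> omega

lemma pv_score_mem_S40 (rec : String) : pvScore rec ∈ PySem.List.pyRange 40 (-1) (-1) := by
  have h := pv_score_bounds rec
  rw [pv_S40_lit]
  simp only [List.mem_cons, List.not_mem_nil, or_false]
  omega

-- B's bucket dict read back: the recs whose score is s, in input order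
lemma pv_buckets_getD (recs : List String) (d : PySem.Dict Int (List String)) (s : Int) :
    (recs.foldl (fun d rec => d.modify (pvScore rec) [] (fun l => l ++ [rec])) d).getD s []
      = d.getD s [] ++ recs.filter (fun r => pvScore r == s) := by
  induction recs generalizing d with
  | nil => simp
  | cons rec recs ih =>
    simp only [List.foldl_cons]
    rw [ih]
    by_cases h : pvScore rec = s
    · rw [h, PySem.Dict.getD_modify_self]
      simp [List.filter, h, List.append_assoc]
    · rw [PySem.Dict.getD_modify_of_ne]
      · have : (pvScore rec == s) = false := by simp [h]
        simp [List.filter, this]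
      · exact fun hc => h hc.symm

-- ===== VERDICT (by name: the statement is the Claim_ definition above) =====
theorem prioritize_recommendations_py_spec : Claim_equal_prioritize_recommendations_py := by
  intro recommendations features _
  unfold Spec_prioritize_recommendations_py prioritize_recommendations_py prioritize_recommendations_py_alt
  simp only [PySem.List.foldl_append_singleton_eq_map, List.nil_append,
    PySem.List.foldl_append_eq_flatMap]
  rw [pv_sorted_rev_eq_bucketCat (PySem.List.pyRange 40 (-1) (-1)) pv_S40_pairwise _
    (by intro p hp; simp only [List.mem_map] at hp; obtain ⟨r, _, rfl⟩ := hp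
        exact pv_score_mem_S40 r)]
  simp only [pvBucketCat, List.map_flatMap]
  refine List.flatMap_congr ?_
  intro s _
  rw [pv_buckets_getD recommendations PySem.Dict.empty s]
  simp [List.filter_map, Function.comp_def]
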